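-- pv_equiv track=rewrite | github.com/MasterALiReza/CoDM-Attach | core/database/sql_helpers.py | adapt_placeholder
-- ===== SOURCE A (Python) =====
-- from typing import Optional, Union
--
-- def adapt_placeholder(query: str, backend: Optional[str] = None) -> str:
--     """
--     تبدیل placeholders در query
--
--     Args:
--         query: Query با placeholder
--         backend: target backend
--
--     Returns:
--         Query با placeholder صحیح
--     """
--     # PostgreSQL only - convert $ placeholders to %s if present
--     parts = []
--     in_string = False
--     quote_char = None
--     i = 0
--     while i < len(query):
--         char = query[i]
--         if char in ('"', "'") and (i == 0 or query[i-1] != '\\'):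
--             if not in_string:
--                 in_string = True
--                 quote_char = char
--             elif char == quote_char:
--                 in_string = False
--                 quote_char = None
--         if char == '$' and not in_string:
--             parts.append('%s')
--         else:
--             parts.append(char)
--         i += 1
--     return ''.join(parts)
-- ===== SOURCE B (Python) =====
-- def adapt_placeholder(query, backend=None):
--     """Two-mode scan: copy string literals verbatim in an inner loop,
--     replace '$' with '%s' only in the outer (non-string) loop."""
--     out = []
--     i = 0
--     n = len(query)
--     while i < n:
--         c = query[i]
--         if c in ('"', "'") and (i == 0 or query[i - 1] != '\\'):
--             # entering a string literal: copy it verbatim, including quotes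
--             out.append(c)
--             i += 1
--             while i < n:
--                 ch = query[i]
--                 out.append(ch)
--                 if ch == c and query[i - 1] != '\\':
--                     i += 1
--                     break
--                 i += 1
--         else:
--             out.append('%s' if c == '$' else c)
--             i += 1
--     return ''.join(out)
-- ===== Notes on version B (the rewrite author's own statement) =====
-- stated objective: alternative
-- what changed: A scans every character with running in_string/quote_char state variables; B uses a stateless two-mode scan: an outer loop that rewrites dollar placeholders outside strings and a nested inner loop that copies each quoted literal verbatim up to its unescaped closing quote.
import Mathlib
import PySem

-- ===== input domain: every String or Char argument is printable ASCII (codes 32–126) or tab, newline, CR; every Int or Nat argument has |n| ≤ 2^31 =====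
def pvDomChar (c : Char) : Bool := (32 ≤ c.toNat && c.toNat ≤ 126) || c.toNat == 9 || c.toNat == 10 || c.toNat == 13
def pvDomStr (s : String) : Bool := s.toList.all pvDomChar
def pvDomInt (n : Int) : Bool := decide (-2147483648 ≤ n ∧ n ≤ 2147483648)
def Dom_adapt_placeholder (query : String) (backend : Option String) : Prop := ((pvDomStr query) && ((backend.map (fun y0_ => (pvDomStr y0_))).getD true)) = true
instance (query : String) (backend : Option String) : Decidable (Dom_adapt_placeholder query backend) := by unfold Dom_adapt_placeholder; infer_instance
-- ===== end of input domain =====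

-- B replaces A's single per-character loop with in_string/quote_char state by a stateless
-- two-mode scan (outer loop outside strings, inner loop copying each literal verbatim);
-- objective: alternative decomposition, same cost.

-- ===== PORT A =====
-- A's while loop: state (in_string, quote_char, parts), one step per character.
def aLoop (cs : List Char) (i : Nat) (inStr : Bool) (qc : Option Char) (parts : List String) : List String :=
  if _h : i < cs.length then
    let c := cs[i]
    let st : Bool × Option Char :=
      if (c = '"' ∨ c = '\'') ∧ (i = 0 ∨ cs[i-1]! ≠ '\\') then
        if inStr = false then (true, some c)
        else if some c = qc then (false, none)
        else (inStr, qc)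
      else (inStr, qc)
    let parts' := if c = '$' ∧ st.1 = false then parts ++ ["%s"] else parts ++ [c.toString]
    aLoop cs (i+1) st.1 st.2 parts'
  else parts
termination_by cs.length - i

def adapt_placeholder (query : String) (_backend : Option String) : String :=
  String.join (aLoop query.toList 0 false none [])

-- ===== PORT B =====
-- B's outer loop (outside any string literal) and inner loop (inside one, opened by q).
mutual
def bOut (cs : List Char) (i : Nat) : List Char :=
  if _h : i < cs.length then
    let c := cs[i]
    if (c = '"' ∨ c = '\'') ∧ (i = 0 ∨ cs[i-1]! ≠ '\\') then
      c :: bIn cs (i+1) c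
    else if c = '$' then '%' :: 's' :: bOut cs (i+1)
    else c :: bOut cs (i+1)
  else []
termination_by cs.length - i

def bIn (cs : List Char) (i : Nat) (q : Char) : List Char :=
  if _h : i < cs.length then
    let c := cs[i]
    if c = q ∧ cs[i-1]! ≠ '\\' then c :: bOut cs (i+1)
    else c :: bIn cs (i+1) q
  else []
termination_by cs.length - i
end

def adapt_placeholder_alt (query : String) (_backend : Option String) : String :=
  String.ofList (bOut query.toList 0)

-- ===== PRECONDITION & SPEC =====
def Spec_adapt_placeholder (query : String) (backend : Option String) (out : String) : Prop := out = adapt_placeholder_alt query backend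
instance (query : String) (backend : Option String) (out : String) : Decidable (Spec_adapt_placeholder query backend out) := by unfold Spec_adapt_placeholder; infer_instance

-- ===== CLAIM (what is proved, stated in full; the proofs are below) =====
def Claim_equal_adapt_placeholder : Prop := ∀ (query : String) (backend : Option String), Dom_adapt_placeholder query backend → Spec_adapt_placeholder query backend (adapt_placeholder query backend)

-- ===== LEMMAS AND PROOFS =====

theorem join_append_single (parts : List String) (s : String) :
    String.join (parts ++ [s]) = String.join parts ++ s := by
  induction parts with
  | nil => simp [String.join]
  | cons a l ih => simp [String.join]

theorem ofList_cons' (c : Char) (l : List Char) :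
    String.ofList (c :: l) = c.toString ++ String.ofList l := by
  apply String.toList_injective; simp

theorem key (k : Nat) : ∀ (cs : List Char) (i : Nat) (parts : List String), cs.length - i ≤ k →
    (String.join (aLoop cs i false none parts) = String.join parts ++ String.ofList (bOut cs i)) ∧
    (∀ q : Char, 1 ≤ i → (q = '"' ∨ q = '\'') →
      String.join (aLoop cs i true (some q) parts) = String.join parts ++ String.ofList (bIn cs i q)) := by
  induction k with
  | zero =>
    intro cs i parts h
    have hge : ¬ i < cs.length := by omega
    rw [aLoop, bOut]
    refine ⟨by simp [hge], ?_⟩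
    intro q _ _
    rw [aLoop, bIn]
    simp [hge]
  | succ k ih =>
    intro cs i parts h
    by_cases hi : i < cs.length
    · have hk : cs.length - (i + 1) ≤ k := by omega
      constructor
      · rw [aLoop, bOut]
        simp only [dif_pos hi]
        by_cases hq : (cs[i] = '"' ∨ cs[i] = '\'') ∧ (i = 0 ∨ cs[i-1]! ≠ '\\')
        · have hne : ¬ cs[i] = '$' := by
            rcases hq.1 with h1 | h1 <;> rw [h1] <;> decide
          simp only [if_pos hq, if_true, Bool.true_eq_false, and_false, if_false]
          rw [(ih cs (i+1) (parts ++ [(cs[i]).toString]) hk).2 cs[i] (by omega) hq.1]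
          rw [join_append_single, ofList_cons', String.append_assoc]
        · simp only [if_neg hq]
          by_cases hd : cs[i] = '$'
          · simp only [and_true, if_pos hd]
            rw [(ih cs (i+1) (parts ++ ["%s"]) hk).1]
            rw [join_append_single, ofList_cons', ofList_cons', String.append_assoc]
            rfl
          · simp only [and_true, if_neg hd]
            rw [(ih cs (i+1) (parts ++ [(cs[i]).toString]) hk).1]
            rw [join_append_single, ofList_cons', String.append_assoc]
      · intro q hi1 hq'
        rw [aLoop, bIn]
        simp only [dif_pos hi]
        by_cases hb : cs[i] = q ∧ cs[i-1]! ≠ '\\'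
        · -- closing quote: A toggles off, B returns to outer mode
          have hA : (cs[i] = '"' ∨ cs[i] = '\'') ∧ (i = 0 ∨ cs[i-1]! ≠ '\\') := by
            refine ⟨?_, Or.inr hb.2⟩
            rw [hb.1]; exact hq'
          have hne : ¬ cs[i] = '$' := by
            rcases hA.1 with h1 | h1 <;> rw [h1] <;> decide
          simp only [if_pos hA, if_pos hb, Bool.true_eq_false, if_false,
            if_pos (show some cs[i] = some q from by rw [hb.1]), and_true, if_neg hne]
          rw [(ih cs (i+1) (parts ++ [(cs[i]).toString]) hk).1]
          rw [join_append_single, ofList_cons', String.append_assoc]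
        · -- stay inside the string
          simp only [if_neg hb]
          have hstate :
              (if (cs[i] = '"' ∨ cs[i] = '\'') ∧ (i = 0 ∨ cs[i-1]! ≠ '\\') then
                if (true : Bool) = false then (true, some cs[i])
                else if some cs[i] = some q then (false, (none : Option Char))
                else ((true : Bool), some q)
              else ((true : Bool), some q)) = ((true : Bool), some q) := by
            by_cases hA : (cs[i] = '"' ∨ cs[i] = '\'') ∧ (i = 0 ∨ cs[i-1]! ≠ '\\')
            · have hcq : ¬ cs[i] = q :=
                fun hcq => hb ⟨hcq, hA.2.resolve_left (by omega)⟩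
              simp [hA, hcq]
            · rw [if_neg hA]
          rw [hstate]
          simp only [Bool.true_eq_false, and_false, if_false]
          rw [(ih cs (i+1) (parts ++ [(cs[i]).toString]) hk).2 q (by omega) hq']
          rw [join_append_single, ofList_cons', String.append_assoc]
    · rw [aLoop, bOut]
      refine ⟨by simp [hi], ?_⟩
      intro q _ _
      rw [aLoop, bIn]
      simp [hi]

-- ===== VERDICT (by name: the statement is the Claim_ definition above) =====
theorem adapt_placeholder_spec : Claim_equal_adapt_placeholder := by
  intro query backend _
  unfold Spec_adapt_placeholder adapt_placeholder adapt_placeholder_alt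
  simpa using (key (query.toList.length) query.toList 0 [] (by omega)).1
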